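-- pv_equiv track=rewrite | github.com/FanKuan44/FinalProject_ | nsganet.py | insert_to_list_x
-- ===== SOURCE A (Python) =====
-- def insert_to_list_x(x):
--     added = ['|', '|', '|']
--     indices = [4, 8, 12]
--
--     acc = 0
--     for i in range(len(added)):
--         x.insert(indices[i]+acc, added[i])
--         acc += 1
--     return x
-- ===== SOURCE B (Python) =====
-- def insert_to_list_x(x):
--     x[:] = x[:4] + ['|'] + x[4:8] + ['|'] + x[8:12] + ['|'] + x[12:]
--     return x
-- ===== Notes on version B (the rewrite author's own statement) =====
-- stated objective: simpler
-- what changed: Replaced the three-insert loop with its offset accumulator by a single slice-based assembly of the four segments x[:4], x[4:8], x[8:12], x[12:] joined by bar separators, written back in place via slice assignment so the argument is still mutated and returned.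
import Mathlib
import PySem

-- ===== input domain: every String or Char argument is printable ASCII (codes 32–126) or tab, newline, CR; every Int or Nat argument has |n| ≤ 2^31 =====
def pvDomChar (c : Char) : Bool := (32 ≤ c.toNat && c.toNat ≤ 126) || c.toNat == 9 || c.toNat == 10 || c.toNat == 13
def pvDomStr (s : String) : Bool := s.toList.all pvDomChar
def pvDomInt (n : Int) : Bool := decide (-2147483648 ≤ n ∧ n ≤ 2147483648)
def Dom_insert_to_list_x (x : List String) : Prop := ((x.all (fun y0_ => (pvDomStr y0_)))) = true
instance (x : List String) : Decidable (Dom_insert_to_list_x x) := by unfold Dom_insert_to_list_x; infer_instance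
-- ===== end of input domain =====

-- B replaces A's three-insert loop (with an offset accumulator) by one slice-based
-- assembly at the fixed boundaries 4/8/12; objective: simpler.  A mutates its
-- argument in place and returns it; Source B mirrors that mutation via slice
-- assignment, and the equivalence proved here is about the returned value.

-- ===== PORT A =====
-- Literal port of A: the added/indices lists, a counted loop over
-- range(len(added)) with state (the list being mutated, acc).
-- added[i]/indices[i] are ported with pyGetD; every i ∈ {0,1,2} the loop
-- produces is in range for both 3-element lists, so the default is never used.
def insert_to_list_x (x : List String) : List String :=
  let added : List String := ["|", "|", "|"]
  let indices : List Int := [4, 8, 12]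
  let st :=
    (PySem.List.pyRange 0 (added.length) 1).foldl
      (fun (st : List String × Int) i =>
        (PySem.List.insert st.1 (PySem.List.pyGetD indices i 0 + st.2)
          (PySem.List.pyGetD added i ""), st.2 + 1))
      (x, 0)
  st.1

-- ===== PORT B =====
-- Port of Source B: x[:4] + ['|'] + x[4:8] + ['|'] + x[8:12] + ['|'] + x[12:]
def insert_to_list_x_alt (x : List String) : List String :=
  PySem.List.slice x none (some 4) ++ ["|"] ++
  PySem.List.slice x (some 4) (some 8) ++ ["|"] ++
  PySem.List.slice x (some 8) (some 12) ++ ["|"] ++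
  PySem.List.slice x (some 12) none

-- ===== PRECONDITION & SPEC =====
def Spec_insert_to_list_x (x : List String) (out : List String) : Prop := out = insert_to_list_x_alt x
instance (x : List String) (out : List String) : Decidable (Spec_insert_to_list_x x out) := by unfold Spec_insert_to_list_x; infer_instance

-- ===== CLAIM (what is proved, stated in full; the proofs are below) =====
def Claim_equal_insert_to_list_x : Prop := ∀ (x : List String), Dom_insert_to_list_x x → Spec_insert_to_list_x x (insert_to_list_x x)

-- ===== LEMMAS AND PROOFS =====

-- The insert chain A's loop produces equals B's slice assembly, for every list:
-- lists of length < 12 are handled by exhaustive structural cases (both sides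
-- reduce), the ≥ 12 case symbolically via insert_ofNat / slice_to / slice_toNat.
theorem insert_chain_eq_slices (x : List String) :
    PySem.List.insert (PySem.List.insert (PySem.List.insert x 4 "|") 9 "|") 14 "|"
      = insert_to_list_x_alt x := by
  unfold insert_to_list_x_alt
  rcases x with _ | ⟨a0, _ | ⟨a1, _ | ⟨a2, _ | ⟨a3, _ | ⟨a4, _ | ⟨a5, _ | ⟨a6,
    _ | ⟨a7, _ | ⟨a8, _ | ⟨a9, _ | ⟨a10, _ | ⟨a11, rest⟩⟩⟩⟩⟩⟩⟩⟩⟩⟩⟩⟩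
  case cons.cons.cons.cons.cons.cons.cons.cons.cons.cons.cons.cons =>
    rw [PySem.List.insert_ofNat _ 4 _ (by simp)]
    rw [PySem.List.insert_ofNat _ 9 _ (by simp)]
    rw [PySem.List.insert_ofNat _ 14 _ (by simp)]
    rw [PySem.List.slice_to _ (by norm_num),
        PySem.List.slice_toNat _ (by norm_num) (by norm_num),
        PySem.List.slice_toNat _ (by norm_num) (by norm_num),
        PySem.List.slice_from _ (by norm_num)]
    rfl
  all_goals simp [PySem.List.insert, PySem.List.sliceIndices, PySem.List.slice, PySem.List.clampIdx]

-- ===== VERDICT (by name: the statement is the Claim_ definition above) =====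
theorem insert_to_list_x_spec : Claim_equal_insert_to_list_x := by
  intro x _
  unfold Spec_insert_to_list_x insert_to_list_x
  norm_num
  rw [show PySem.List.pyRange 0 (3:Int) 1 = [0,1,2] from by decide]
  simp only [List.foldl]
  norm_num [PySem.List.pyGetD]
  exact insert_chain_eq_slices x
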